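-- pv_equiv track=rewrite | github.com/rikvegter/handwriting_recognition | local_feature_extractor.py | get_height_of_letter
-- ===== SOURCE A (Python) =====
-- INK_THRESHOLD = 20
--
-- def reverse_enum(L):
--    for index in reversed(range(len(L))):
--       yield index, L[index]
--
-- def get_height_of_letter(vert_profile):
--     top = 0
--     bottom = 0
--     in_line = 0
--     #Find the highest position in the picture with ink
--     for i in range(0, len(vert_profile)):
--         if vert_profile[i] > INK_THRESHOLD:
--             top = i
--             break
--     #Find the lowest position in the picture with ink
--     for index, item in reverse_enum(vert_profile):
--         if item > INK_THRESHOLD: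
--             bottom = index
--             break
--
--     height = bottom - top
--     return height
-- ===== SOURCE B (Python) =====
-- INK_THRESHOLD = 20
--
-- def get_height_of_letter(vert_profile):
--     inked = [i for i, v in enumerate(vert_profile) if v > INK_THRESHOLD]
--     if not inked:
--         return 0
--     return inked[-1] - inked[0]
-- ===== Notes on version B (the rewrite author's own statement) =====
-- stated objective: simpler
-- what changed: Replaces A's two directed early-break scans (forward for top, a reversed-enumerate generator for bottom) with one comprehension collecting inked indices and reading its endpoints.
import Mathlib
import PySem

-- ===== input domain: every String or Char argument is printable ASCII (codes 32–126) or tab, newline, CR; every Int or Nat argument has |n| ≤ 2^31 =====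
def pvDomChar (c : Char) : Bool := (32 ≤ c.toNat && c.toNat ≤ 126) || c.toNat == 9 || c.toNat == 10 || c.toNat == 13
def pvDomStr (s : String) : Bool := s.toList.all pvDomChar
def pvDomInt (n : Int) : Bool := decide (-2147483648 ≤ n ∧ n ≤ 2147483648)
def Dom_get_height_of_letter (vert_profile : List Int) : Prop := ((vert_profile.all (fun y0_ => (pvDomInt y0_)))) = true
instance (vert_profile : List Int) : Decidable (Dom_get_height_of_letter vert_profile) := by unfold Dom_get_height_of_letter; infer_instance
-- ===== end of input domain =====

-- B replaces A's two early-break directed scans with one pass collecting inked indices and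
-- reading that list's endpoints (objective: simpler).

-- shared transliteration of Python index/value enumeration, Int indices starting at i
def pvEnumInt (i : Int) : List Int → List (Int × Int)
  | [] => []
  | v :: rest => (i, v) :: pvEnumInt (i + 1) rest

-- ===== PORT A =====
-- first forward loop: 'for i in range(len): if vp[i] > 20: top = i; break'  (top stays 0 if no ink)
def pvTopScan (i : Int) : List Int → Int
  | [] => 0
  | v :: rest => if v > 20 then i else pvTopScan (i + 1) rest

-- second loop: 'for index, item in reverse_enum(vp): if item > 20: bottom = index; break'
def pvBotScan : List (Int × Int) → Int
  | [] => 0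
  | (i, v) :: rest => if v > 20 then i else pvBotScan rest

def get_height_of_letter (vert_profile : List Int) : Int :=
  let top := pvTopScan 0 vert_profile
  let bottom := pvBotScan (pvEnumInt 0 vert_profile).reverse
  bottom - top

-- ===== PORT B =====
def get_height_of_letter_alt (vert_profile : List Int) : Int :=
  let inked := ((pvEnumInt 0 vert_profile).filter (fun p => p.2 > 20)).map Prod.fst
  match inked with
  | [] => 0
  | x :: xs => (x :: xs).getLast (List.cons_ne_nil x xs) - x

-- ===== PRECONDITION & SPEC =====
def Spec_get_height_of_letter (vert_profile : List Int) (out : Int) : Prop := out = get_height_of_letter_alt vert_profile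
instance (vert_profile : List Int) (out : Int) : Decidable (Spec_get_height_of_letter vert_profile out) := by unfold Spec_get_height_of_letter; infer_instance

-- ===== CLAIM (what is proved, stated in full; the proofs are below) =====
def Claim_equal_get_height_of_letter : Prop := ∀ (vert_profile : List Int), Dom_get_height_of_letter vert_profile → Spec_get_height_of_letter vert_profile (get_height_of_letter vert_profile)

-- ===== LEMMAS AND PROOFS =====

-- A's forward scan returns the head of the filtered index list (0 when empty)
theorem pvTopScan_eq (vp : List Int) : ∀ i : Int,
    pvTopScan i vp =
      (((pvEnumInt i vp).filter (fun p => p.2 > 20)).map Prod.fst).headD 0 := by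
  induction vp with
  | nil => intro i; simp [pvTopScan, pvEnumInt]
  | cons v rest ih =>
      intro i
      by_cases h : v > 20
      · simp [pvTopScan, pvEnumInt, h]
      · simp [pvTopScan, pvEnumInt, h, ih (i + 1)]

-- A's reverse scan over any pair list is the head of its filtered prefix (0 when empty)
theorem pvBotScan_eq (l : List (Int × Int)) :
    pvBotScan l = ((l.filter (fun p => p.2 > 20)).map Prod.fst).headD 0 := by
  induction l with
  | nil => simp [pvBotScan]
  | cons p rest ih =>
      obtain ⟨i, v⟩ := p
      by_cases h : v > 20
      · simp [pvBotScan, h]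
      · simp [pvBotScan, h, ih]

-- getLast? with a default from the front is getLast of the cons
theorem pvGetDLast (d x : Int) (xs : List Int) :
    ((x :: xs).getLast?).getD d = (x :: xs).getLast (List.cons_ne_nil x xs) := by
  rw [List.getLast?_eq_some_getLast (List.cons_ne_nil x xs)]
  rfl

-- ===== VERDICT (by name: the statement is the Claim_ definition above) =====
theorem get_height_of_letter_spec : Claim_equal_get_height_of_letter := by
  intro vp _
  unfold Spec_get_height_of_letter get_height_of_letter get_height_of_letter_alt
  rw [pvBotScan_eq, pvTopScan_eq]
  simp only [List.filter_reverse, List.map_reverse]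
  cases h : ((pvEnumInt 0 vp).filter (fun p => p.2 > 20)).map Prod.fst with
  | nil => simp
  | cons x xs =>
      simp only [List.headD_eq_head?, List.head?_reverse]
      simp [pvGetDLast]
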